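-- pv_equiv track=rewrite | github.com/flbdx/AoC_2018 | day_20.py | work_p1_p2
-- ===== SOURCE A (Python) =====
-- from enum import Enum
-- from collections import deque
--
-- class Direction(Enum):
--     NORTH = 'N'
--     WEST = 'W'
--     EAST = 'E'
--     SOUTH = 'S'
--
--     def next(self, p):
--         if self == Direction.NORTH:
--             return (p[0], p[1] + 1)
--         if self == Direction.EAST:
--             return (p[0] + 1, p[1])
--         if self == Direction.SOUTH:
--             return (p[0], p[1] - 1)
--         if self == Direction.WEST:
--             return (p[0] - 1, p[1])
--
-- def work_p1_p2(line):
--     line = line.strip()[1:-1]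
--
--     stack = deque()
--     p = (0, 0)
--     distances = {p: 0}
--     p_prev = p
--     for c in line:
--         if c == '(':
--             stack.append((p, p_prev))
--             p_prev = p
--         elif c == ')':
--             p, p_prev = stack.pop()
--         elif c == '|':
--             p, p_prev = stack[-1]
--         else: #c in ['N', 'E', 'W', 'S']:
--             p = Direction(c).next(p)
--             if distances.get(p, 0) != 0:
--                 distances[p] = min(distances[p], distances[p_prev] + 1)
--             else:
--                 distances[p] = distances.get(p_prev, 0) + 1
--             p_prev = p
--
--     return (max(distances.values()), sum(1 for d in distances.values() if d >= 1000))
-- ===== SOURCE B (Python) =====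
-- def work_p1_p2(line):
--     # Recursive-descent parser over the stripped regex instead of A's explicit stack machine.
--     line = line.strip()[1:-1]
--     n = len(line)
--     steps = {'N': (0, 1), 'E': (1, 0), 'S': (0, -1), 'W': (-1, 0)}
--     distances = {(0, 0): 0}
--
--     def parse(i, p, pp, sv):
--         # consume chars from index i up to the matching ')' (or end of string);
--         # sv is the (position, branch-start) pair saved at the enclosing '('
--         while i < n:
--             c = line[i]
--             if c == ')':
--                 return i + 1
--             if c == '|':
--                 p, pp = sv
--                 i += 1
--             elif c == '(':
--                 i = parse(i + 1, p, p, (p, pp))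
--                 # after the group, p and pp are this frame's values again
--             else:
--                 dx, dy = steps[c]
--                 p2 = (p[0] + dx, p[1] + dy)
--                 if distances.get(p2, 0) != 0:
--                     distances[p2] = min(distances[p2], distances[pp] + 1)
--                 else:
--                     distances[p2] = distances.get(pp, 0) + 1
--                 p = pp = p2
--                 i += 1
--         return n
--
--     parse(0, (0, 0), (0, 0), ((0, 0), (0, 0)))
--     return (max(distances.values()), sum(1 for d in distances.values() if d >= 1000))
-- ===== Notes on version B (the rewrite author's own statement) =====
-- stated objective: alternative
-- what changed: Replaces A's single character loop with an explicit deque of saved (position, branch-start) pairs by a recursive-descent parser whose call stack holds one saved pair per open group ('|' restarts from it, the matching ')' returns to it), with the identical distance-update rule and final (max, count>=1000) line.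
import Mathlib
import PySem

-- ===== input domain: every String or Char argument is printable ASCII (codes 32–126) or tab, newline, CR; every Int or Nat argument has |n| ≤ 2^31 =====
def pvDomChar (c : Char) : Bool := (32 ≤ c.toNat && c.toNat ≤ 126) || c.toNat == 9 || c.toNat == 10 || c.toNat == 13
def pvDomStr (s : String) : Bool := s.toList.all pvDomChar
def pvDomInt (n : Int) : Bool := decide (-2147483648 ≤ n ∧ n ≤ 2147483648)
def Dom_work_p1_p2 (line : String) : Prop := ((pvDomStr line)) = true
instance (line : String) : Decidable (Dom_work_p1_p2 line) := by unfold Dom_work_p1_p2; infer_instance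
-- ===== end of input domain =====

-- B replaces A's explicit-stack character loop by a recursive-descent group parser
-- (same distance-update rule); objective: alternative decomposition, same cost.

-- ===== PORT A =====
-- common helpers (identical lines in Source A and Source B): Direction(c).next(p),
-- the distances-dict update, and the final (max, count>=1000) line
abbrev PvPos := Int × Int

-- Direction(c).next(p); none = ValueError of Direction(c)
def pvDirNext? (c : Char) (p : PvPos) : Option PvPos :=
  if c = 'N' then some (p.1, p.2 + 1)
  else if c = 'E' then some (p.1 + 1, p.2)
  else if c = 'S' then some (p.1, p.2 - 1)
  else if c = 'W' then some (p.1 - 1, p.2)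
  else none

-- if distances.get(p2,0)!=0: distances[p2]=min(distances[p2],distances[pp]+1) else distances[p2]=distances.get(pp,0)+1
-- (distances[p2]/distances[pp] read with getD 0: both keys are present whenever Python reads them)
def pvUpd (d : PySem.Dict PvPos Int) (p2 pp : PvPos) : PySem.Dict PvPos Int :=
  if d.getD p2 0 ≠ 0 then d.insert p2 (min (d.getD p2 0) (d.getD pp 0 + 1))
  else d.insert p2 (d.getD pp 0 + 1)

-- return (max(distances.values()), sum(1 for d in distances.values() if d >= 1000))
def pvFinish (d : PySem.Dict PvPos Int) : Int × Int :=
  ((PySem.List.max? d.values (fun x => x)).getD 0,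
   (d.values.map (fun v => if v ≥ 1000 then (1 : Int) else 0)).sum)

-- A's for-loop: state stack/p/p_prev/distances; none = IndexError (pop/peek on empty deque) or ValueError (bad char)
def pvRunA : List Char → List (PvPos × PvPos) → PvPos → PvPos → PySem.Dict PvPos Int →
    Option (PySem.Dict PvPos Int)
  | [], _, _, _, d => some d
  | c :: rest, stack, p, pp, d =>
    if c = '(' then pvRunA rest ((p, pp) :: stack) p p d
    else if c = ')' then
      match stack with
      | [] => none
      | (q, qq) :: s => pvRunA rest s q qq d
    else if c = '|' then
      match stack with
      | [] => none
      | (q, qq) :: s => pvRunA rest ((q, qq) :: s) q qq d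
    else
      match pvDirNext? c p with
      | none => none
      | some p2 => pvRunA rest stack p2 p2 (pvUpd d p2 pp)

def work_p1_p2 (line : String) : Int × Int :=
  let content := PySem.List.slice (PySem.Str.strip line).toList (some 1) (some (-1))
  match pvRunA content [] (0, 0) (0, 0) ((PySem.Dict.empty).insert (0, 0) 0) with
  | some d => pvFinish d
  | none => (0, 0)  -- Python raises here; excluded by Pre_

-- ===== PORT B =====
-- Source B's recursive parse(i, p, pp, sv): consumes up to the matching ')' (or the end),
-- returns the rest; sv is the pair saved at the enclosing '('.  Fuel = number of
-- characters still ahead (index recursion in Source B); fuel ≥ length is always enough.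
def pvParseB : Nat → List Char → PvPos → PvPos → PvPos × PvPos → PySem.Dict PvPos Int →
    Option (List Char × PySem.Dict PvPos Int)
  | 0, cs, _, _, _, d => some (cs, d)
  | fuel + 1, cs, p, pp, sv, d =>
    match cs with
    | [] => some ([], d)
    | c :: rest =>
      if c = ')' then some (rest, d)
      else if c = '|' then pvParseB fuel rest sv.1 sv.2 sv d
      else if c = '(' then
        match pvParseB fuel rest p p (p, pp) d with
        | none => none
        | some (rest2, d2) => pvParseB fuel rest2 p pp sv d2
      else
        match pvDirNext? c p with
        | none => none  -- KeyError in Source B; excluded by Pre_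
        | some p2 => pvParseB fuel rest p2 p2 sv (pvUpd d p2 pp)

def work_p1_p2_alt (line : String) : Int × Int :=
  let content := PySem.List.slice (PySem.Str.strip line).toList (some 1) (some (-1))
  match pvParseB content.length content (0, 0) (0, 0) ((0, 0), (0, 0))
      ((PySem.Dict.empty).insert (0, 0) 0) with
  | some (_, d) => pvFinish d
  | none => (0, 0)  -- Python raises here; excluded by Pre_

-- ===== PRECONDITION & SPEC =====
-- shape check on the stripped inner string: every char is one of N E S W ( ) | ,
-- and every ')' / '|' occurs inside an open '(' (k = current nesting depth)
def pvBalOk : List Char → Nat → Bool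
  | [], _ => true
  | c :: rest, k =>
    if c = '(' then pvBalOk rest (k + 1)
    else if c = ')' then decide (k ≠ 0) && pvBalOk rest (k - 1)
    else if c = '|' then decide (k ≠ 0) && pvBalOk rest k
    else (c = 'N' || c = 'E' || c = 'S' || c = 'W') && pvBalOk rest k

-- Pre_ = exactly the inputs where A returns: in the trimmed inner string (first and
-- last chars of the stripped line are dropped before the scan, so a 1-char line has an
-- empty scan), a close-group or alternation char outside an open group raises IndexError
-- and any char besides N E S W ( raises ValueError
def Pre_work_p1_p2 (line : String) : Prop :=
  pvBalOk (PySem.List.slice (PySem.Str.strip line).toList (some 1) (some (-1))) 0 = true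

instance (line : String) : Decidable (Pre_work_p1_p2 line) := by
  unfold Pre_work_p1_p2; infer_instance

def pvWitness_work_p1_p2 : String := "^N(E|W)N$"

def Spec_work_p1_p2 (line : String) (out : Int × Int) : Prop := out = work_p1_p2_alt line
instance (line : String) (out : Int × Int) : Decidable (Spec_work_p1_p2 line out) := by
  unfold Spec_work_p1_p2; infer_instance

-- ===== CLAIM (what is proved, stated in full; the proofs are below) =====
def Claim_equal_work_p1_p2 : Prop :=
  ∀ (line : String), Dom_work_p1_p2 line → Pre_work_p1_p2 line →
    Spec_work_p1_p2 line (work_p1_p2 line)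

-- ===== LEMMAS AND PROOFS =====

-- the rest returned by pvParseB is no longer than its input
theorem pvParseB_rest_le (fuel : Nat) : ∀ (cs : List Char) (p pp : PvPos) (sv : PvPos × PvPos)
    (d : PySem.Dict PvPos Int) (rest : List Char) (d2 : PySem.Dict PvPos Int),
    pvParseB fuel cs p pp sv d = some (rest, d2) → rest.length ≤ cs.length := by
  induction fuel with
  | zero =>
    intro cs p pp sv d rest d2 h
    simp only [pvParseB, Option.some.injEq, Prod.mk.injEq] at h
    simp [← h.1]
  | succ fuel ih =>
    intro cs p pp sv d rest d2 h
    cases cs with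
    | nil =>
      simp only [pvParseB, Option.some.injEq, Prod.mk.injEq] at h
      simp [← h.1]
    | cons c r =>
      simp only [pvParseB] at h
      split_ifs at h with h1 h2 h3
      · simp only [Option.some.injEq, Prod.mk.injEq] at h
        simp [← h.1, List.length_cons]
      · have := ih r sv.1 sv.2 sv d rest d2 h
        simp [List.length_cons]; omega
      · rcases hpb : pvParseB fuel r p p (p, pp) d with _ | ⟨rest2, dd⟩ <;> rw [hpb] at h
        · exact absurd h (by simp)
        · have h4 := ih r p p (p, pp) d rest2 dd hpb
          have h5 := ih rest2 p pp sv dd rest d2 h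
          simp [List.length_cons]; omega
      · rcases hdn : pvDirNext? c p with _ | p2 <;> rw [hdn] at h
        · exact absurd h (by simp)
        · have := ih r p2 p2 sv (pvUpd d p2 pp) rest d2 h
          simp [List.length_cons]; omega

-- A's loop never looks below the top of the stack while pvBalOk holds at the stack's depth
theorem pvRunA_ext : ∀ (cs : List Char) (stack extra : List (PvPos × PvPos)) (p pp : PvPos)
    (d : PySem.Dict PvPos Int), pvBalOk cs stack.length = true →
    pvRunA cs (stack ++ extra) p pp d = pvRunA cs stack p pp d := by
  intro cs
  induction cs with
  | nil => intro stack extra p pp d _; simp [pvRunA]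
  | cons c r ih =>
    intro stack extra p pp d hb
    simp only [pvBalOk] at hb
    simp only [pvRunA]
    split_ifs at hb ⊢ with h1 h2 h3
    · exact ih ((p, pp) :: stack) extra p p d hb
    · simp only [Bool.and_eq_true, decide_eq_true_eq] at hb
      cases stack with
      | nil => exact absurd rfl hb.1
      | cons top s =>
        obtain ⟨q, qq⟩ := top
        simpa using ih s extra q qq d (by simpa using hb.2)
    · simp only [Bool.and_eq_true, decide_eq_true_eq] at hb
      cases stack with
      | nil => exact absurd rfl hb.1
      | cons top s =>
        obtain ⟨q, qq⟩ := top
        simpa using ih ((q, qq) :: s) extra q qq d (by simpa using hb.2)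
    · simp only [Bool.and_eq_true] at hb
      rcases hdn : pvDirNext? c p with _ | p2
      · rfl
      · exact ih stack extra p2 p2 (pvUpd d p2 pp) hb.2

-- under pvBalOk at depth n the parser's rest is empty at depth 0, and stays balanced otherwise
theorem pvParseB_bal (fuel : Nat) : ∀ (cs : List Char) (n : Nat) (p pp : PvPos)
    (sv : PvPos × PvPos) (d : PySem.Dict PvPos Int) (rest : List Char)
    (d2 : PySem.Dict PvPos Int), cs.length ≤ fuel → pvBalOk cs n = true →
    pvParseB fuel cs p pp sv d = some (rest, d2) →
    (n = 0 → rest = []) ∧ pvBalOk rest (n - 1) = true := by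
  induction fuel with
  | zero =>
    intro cs n p pp sv d rest d2 hle hb h
    have hnil : cs = [] := List.length_eq_zero_iff.mp (Nat.le_zero.mp hle)
    subst hnil
    simp only [pvParseB, Option.some.injEq, Prod.mk.injEq] at h
    exact ⟨fun _ => h.1.symm, by rw [← h.1]; rfl⟩
  | succ fuel ih =>
    intro cs n p pp sv d rest d2 hle hb h
    cases cs with
    | nil =>
      simp only [pvParseB, Option.some.injEq, Prod.mk.injEq] at h
      exact ⟨fun _ => h.1.symm, by rw [← h.1]; rfl⟩
    | cons c r =>
      have hler : r.length ≤ fuel := by simp at hle; omega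
      simp only [pvBalOk] at hb
      simp only [pvParseB] at h
      by_cases h1 : c = ')'
      · rw [if_pos h1] at h
        rw [if_neg (by simp [h1]), if_pos h1] at hb
        simp only [Bool.and_eq_true, decide_eq_true_eq] at hb
        simp only [Option.some.injEq, Prod.mk.injEq] at h
        exact ⟨fun hn0 => absurd hn0 hb.1, by rw [← h.1]; exact hb.2⟩
      · rw [if_neg h1] at h
        by_cases h2 : c = '|'
        · rw [if_pos h2] at h
          rw [if_neg (by simp [h2]), if_neg (by simp [h2]), if_pos h2] at hb
          simp only [Bool.and_eq_true, decide_eq_true_eq] at hb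
          exact ih r n sv.1 sv.2 sv d rest d2 hler hb.2 h
        · rw [if_neg h2] at h
          by_cases h3 : c = '('
          · rw [if_pos h3] at h
            rw [if_pos h3] at hb
            rcases hpb : pvParseB fuel r p p (p, pp) d with _ | ⟨rest2, dd⟩ <;> rw [hpb] at h
            · exact absurd h (by simp)
            · have hmid := ih r (n + 1) p p (p, pp) d rest2 dd hler hb hpb
              have hle2 : rest2.length ≤ fuel :=
                le_trans (pvParseB_rest_le fuel r p p (p, pp) d rest2 dd hpb) hler
              have hbal2 : pvBalOk rest2 n = true := by simpa using hmid.2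
              exact ih rest2 n p pp sv dd rest d2 hle2 hbal2 h
          · rw [if_neg h3] at h
            rw [if_neg h3, if_neg (by simp [h1]), if_neg (by simp [h2])] at hb
            simp only [Bool.and_eq_true] at hb
            rcases hdn : pvDirNext? c p with _ | p2 <;> rw [hdn] at h
            · exact absurd h (by simp)
            · exact ih r n p2 p2 sv (pvUpd d p2 pp) rest d2 hler hb.2 h

-- simulation: A's loop with sv on top of the stack = B's parser followed by A's loop on the rest
theorem pvSim (fuel : Nat) : ∀ (cs : List Char) (p pp : PvPos) (sv : PvPos × PvPos)
    (stack : List (PvPos × PvPos)) (d : PySem.Dict PvPos Int), cs.length ≤ fuel →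
    pvRunA cs (sv :: stack) p pp d =
      (match pvParseB fuel cs p pp sv d with
       | none => none
       | some (rest, d2) => pvRunA rest stack sv.1 sv.2 d2) := by
  induction fuel with
  | zero =>
    intro cs p pp sv stack d hle
    have hnil : cs = [] := List.length_eq_zero_iff.mp (Nat.le_zero.mp hle)
    subst hnil
    simp [pvRunA, pvParseB]
  | succ fuel ih =>
    intro cs p pp sv stack d hle
    cases cs with
    | nil => simp [pvRunA, pvParseB]
    | cons c r =>
      have hler : r.length ≤ fuel := by simp at hle; omega
      by_cases h1 : c = ')'
      · subst h1
        simp [pvRunA, pvParseB]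
      · by_cases h2 : c = '|'
        · subst h2
          simp only [pvRunA, pvParseB]
          norm_num
          exact ih r sv.1 sv.2 sv stack d hler
        · by_cases h3 : c = '('
          · subst h3
            simp only [pvRunA, pvParseB]
            norm_num
            rw [ih r p p (p, pp) (sv :: stack) d hler]
            rcases hpb : pvParseB fuel r p p (p, pp) d with _ | ⟨rest2, dd⟩
            · rfl
            · have hle2 : rest2.length ≤ fuel :=
                le_trans (pvParseB_rest_le fuel r p p (p, pp) d rest2 dd hpb) hler
              simpa using ih rest2 p pp sv stack dd hle2
          · simp only [pvRunA, pvParseB, if_neg h1, if_neg h2, if_neg h3]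
            rcases hdn : pvDirNext? c p with _ | p2
            · rfl
            · exact ih r p2 p2 sv stack (pvUpd d p2 pp) hler

-- ===== VERDICT (by name: the statement is the Claim_ definition above) =====
theorem work_p1_p2_spec : Claim_equal_work_p1_p2 := by
  intro line _ hpre
  unfold Pre_work_p1_p2 at hpre
  unfold Spec_work_p1_p2
  simp only [work_p1_p2, work_p1_p2_alt]
  set d0 : PySem.Dict PvPos Int := (PySem.Dict.empty).insert (0, 0) 0 with hd0
  set content := PySem.List.slice (PySem.Str.strip line).toList (some 1) (some (-1)) with hc
  have hext := pvRunA_ext content [] [((0, 0), (0, 0))] (0, 0) (0, 0) d0 (by simpa using hpre)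
  have hsim := pvSim content.length content (0, 0) (0, 0) ((0, 0), (0, 0)) [] d0 le_rfl
  simp only [List.nil_append] at hext
  rcases hpb : pvParseB content.length content (0, 0) (0, 0) ((0, 0), (0, 0)) d0
      with _ | ⟨rest, d2⟩ <;> rw [hpb] at hsim
  · rw [← hext, hsim]
  · have hrest : rest = [] := (pvParseB_bal content.length content 0 (0, 0) (0, 0)
      ((0, 0), (0, 0)) d0 rest d2 le_rfl hpre hpb).1 rfl
    subst hrest
    rw [← hext, hsim]
    simp [pvRunA]
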